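-- pv_equiv track=rewrite | github.com/OTOYO1020/ChatDev_Intermediate | WareHouse/C_182_DefaultOrganization_20250503214336/utils.py | calculate_min_erased
-- ===== SOURCE A (Python) =====
-- def calculate_min_erased(n):
--     digits = [int(d) for d in str(n)]
--     digit_sum = sum(digits)
--     remainder = digit_sum % 3
--     k = len(digits)
--     min_erased = k  # Start with the maximum number of digits that can be erased
--     # Check if the sum of digits is already a multiple of 3
--     if remainder == 0:
--         return 0  # No need to erase any digits
--     count_remainder_1 = sum(1 for d in digits if d % 3 == 1)
--     count_remainder_2 = sum(1 for d in digits if d % 3 == 2)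
--     if remainder == 1:
--         if count_remainder_1 >= 1:
--             min_erased = min(min_erased, 1)
--         if count_remainder_2 >= 2:
--             min_erased = min(min_erased, 2)
--     elif remainder == 2:
--         if count_remainder_2 >= 1:
--             min_erased = min(min_erased, 1)
--         if count_remainder_1 >= 2:
--             min_erased = min(min_erased, 2)
--     # Return -1 if no valid erasure options were found
--     return min_erased if min_erased < k else -1  # Ensure we return -1 if not possible
-- ===== SOURCE B (Python) =====
-- def calculate_min_erased(n):
--     digits = [int(d) for d in str(n)]
--     r = sum(digits) % 3
--     if r == 0:
--         return 0
--     if len(digits) > 1 and any(d % 3 == r for d in digits):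
--         return 1
--     return 2 if len(digits) > 2 else -1
-- ===== Notes on version B (the rewrite author's own statement) =====
-- stated objective: simpler
-- what changed: B drops A's residue counting (counts of digits ≡1 and ≡2 mod 3) and min-accumulator bookkeeping and uses an early-return closed form: 0 if the digit sum is divisible by 3, 1 if more than one digit and some digit carries the sum's residue, otherwise 2 when more than two digits, else -1 (correct because when no single digit matches the residue, two digits of the complementary residue are always present).
import Mathlib
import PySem

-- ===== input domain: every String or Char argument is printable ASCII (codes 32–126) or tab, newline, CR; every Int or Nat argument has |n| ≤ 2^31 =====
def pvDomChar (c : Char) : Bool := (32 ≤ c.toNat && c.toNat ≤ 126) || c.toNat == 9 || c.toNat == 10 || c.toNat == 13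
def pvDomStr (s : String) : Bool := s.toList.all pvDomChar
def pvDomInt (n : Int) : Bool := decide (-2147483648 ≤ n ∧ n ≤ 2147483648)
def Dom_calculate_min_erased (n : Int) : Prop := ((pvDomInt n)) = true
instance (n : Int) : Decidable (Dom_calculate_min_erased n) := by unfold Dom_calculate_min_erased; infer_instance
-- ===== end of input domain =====

-- B replaces A's residue counting and min-accumulator logic with an early-return closed form (simpler, same cost).

-- ===== PORT A =====
-- int(d) for a single char d: PySem.Int.ofChars? [c]; it is none exactly where Python raises
-- ValueError (the '-' sign of a negative n) — those inputs are excluded by Pre_, .getD 0 is a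
-- total stand-in there.
def calculate_min_erased (n : Int) : Int :=
  let digits := (PySem.Int.toStr n).toList.map (fun c => (PySem.Int.ofChars? [c]).getD 0)
  let digit_sum := digits.sum
  let remainder := PySem.Int.mod digit_sum 3
  let k : Int := digits.length
  let min_erased := k
  if remainder = 0 then 0
  else
    -- sum(1 for d in digits if d % 3 == 1) is the count of such digits (List.countP)
    let count_remainder_1 : Int := digits.countP (fun d => PySem.Int.mod d 3 == 1)
    let count_remainder_2 : Int := digits.countP (fun d => PySem.Int.mod d 3 == 2)
    let min_erased :=
      if remainder = 1 then
        let m := if count_remainder_1 ≥ 1 then min min_erased 1 else min_erased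
        if count_remainder_2 ≥ 2 then min m 2 else m
      else if remainder = 2 then
        let m := if count_remainder_2 ≥ 1 then min min_erased 1 else min_erased
        if count_remainder_1 ≥ 2 then min m 2 else m
      else min_erased
    if min_erased < k then min_erased else -1

-- ===== PORT B =====
def calculate_min_erased_alt (n : Int) : Int :=
  let digits := (PySem.Int.toStr n).toList.map (fun c => (PySem.Int.ofChars? [c]).getD 0)
  let r := PySem.Int.mod digits.sum 3
  if r = 0 then 0
  else if 1 < digits.length ∧ digits.any (fun d => PySem.Int.mod d 3 == r) = true then 1
  else if 2 < digits.length then 2 else -1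

-- ===== PRECONDITION & SPEC =====
-- Python's int(d) raises ValueError on the '-' character of str(n) for negative n, so A
-- returns normally exactly on n ≥ 0.
def Pre_calculate_min_erased (n : Int) : Prop := 0 ≤ n
instance (n : Int) : Decidable (Pre_calculate_min_erased n) := by unfold Pre_calculate_min_erased; infer_instance
def pvWitness_calculate_min_erased : Int := 1234

def Spec_calculate_min_erased (n : Int) (out : Int) : Prop := out = calculate_min_erased_alt n
instance (n : Int) (out : Int) : Decidable (Spec_calculate_min_erased n out) := by unfold Spec_calculate_min_erased; infer_instance

-- ===== CLAIM (what is proved, stated in full; the proofs are below) =====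
def Claim_equal_calculate_min_erased : Prop := ∀ (n : Int), Dom_calculate_min_erased n → Pre_calculate_min_erased n → Spec_calculate_min_erased n (calculate_min_erased n)

-- ===== LEMMAS AND PROOFS =====

-- Python's d % 3 (PySem.Int.mod) coincides with Lean's emod for the positive divisor 3
lemma pvPred (r : Int) :
    (fun d => PySem.Int.mod d 3 == r) = (fun d : Int => d % 3 == r) := by
  funext d
  rw [PySem.Int.mod_eq_emod_of_pos (by norm_num : (0:Int) < 3)]

-- digit sum mod 3 is determined by the counts of residue-1 and residue-2 elements
lemma pvSumMod (ds : List Int) :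
    ds.sum % 3 = ((ds.countP (fun d => d % 3 == 1) : Int)
      + 2 * (ds.countP (fun d => d % 3 == 2) : Int)) % 3 := by
  induction ds with
  | nil => simp
  | cons d t ih =>
    simp only [List.sum_cons, List.countP_cons, beq_iff_eq]
    split_ifs <;> push_cast <;> omega

lemma pvCountLe (ds : List Int) :
    ds.countP (fun d => d % 3 == 1) + ds.countP (fun d => d % 3 == 2) ≤ ds.length := by
  induction ds with
  | nil => simp
  | cons d t ih =>
    simp only [List.countP_cons, List.length_cons, beq_iff_eq]
    split_ifs with h1 h2 <;> omega

lemma pvAnyCount (ds : List Int) (r : Int) :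
    (ds.any (fun d : Int => d % 3 == r) = true) ↔ 0 < ds.countP (fun d : Int => d % 3 == r) := by
  rw [List.countP_pos_iff, List.any_eq_true]

-- the core equivalence, for an arbitrary digit list
lemma pvCore (ds : List Int) :
    (let digit_sum := ds.sum
     let remainder := PySem.Int.mod digit_sum 3
     let k : Int := ds.length
     let min_erased := k
     if remainder = 0 then 0
     else
       let count_remainder_1 : Int := ds.countP (fun d => PySem.Int.mod d 3 == 1)
       let count_remainder_2 : Int := ds.countP (fun d => PySem.Int.mod d 3 == 2)
       let min_erased :=
         if remainder = 1 then
           let m := if count_remainder_1 ≥ 1 then min min_erased 1 else min_erased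
           if count_remainder_2 ≥ 2 then min m 2 else m
         else if remainder = 2 then
           let m := if count_remainder_2 ≥ 1 then min min_erased 1 else min_erased
           if count_remainder_1 ≥ 2 then min m 2 else m
         else min_erased
       if min_erased < k then min_erased else -1 : Int)
    = (let r := PySem.Int.mod ds.sum 3
       if r = 0 then 0
       else if 1 < ds.length ∧ ds.any (fun d => PySem.Int.mod d 3 == r) = true then 1
       else if 2 < ds.length then 2 else -1) := by
  have hm : PySem.Int.mod ds.sum 3 = ds.sum % 3 := PySem.Int.mod_eq_emod_of_pos (by norm_num)
  have hk := pvSumMod ds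
  have hle := pvCountLe ds
  have hb : 0 ≤ ds.sum % 3 ∧ ds.sum % 3 < 3 :=
    ⟨Int.emod_nonneg _ (by norm_num), Int.emod_lt_of_pos _ (by norm_num)⟩
  simp only [hm, pvPred, pvAnyCount]
  rcases (show ds.sum % 3 = 0 ∨ ds.sum % 3 = 1 ∨ ds.sum % 3 = 2 by omega) with hr | hr | hr <;>
    simp only [hr] <;> split_ifs <;> omega

-- ===== VERDICT (by name: the statement is the Claim_ definition above) =====
theorem calculate_min_erased_spec : Claim_equal_calculate_min_erased := by
  intro n _ _
  show calculate_min_erased n = calculate_min_erased_alt n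
  simp only [calculate_min_erased, calculate_min_erased_alt]
  exact pvCore ((PySem.Int.toStr n).toList.map (fun c => (PySem.Int.ofChars? [c]).getD 0))
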